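-- pv_equiv track=rewrite | github.com/mathelai/github.io | imo2002p1/simulation.py | get_type1_subsets
-- ===== SOURCE A (Python) =====
-- import itertools
-- from typing import List, Tuple, Set
--
-- def get_type1_subsets(blue_points: Set[Tuple[int, int]], n: int) -> List[Set[Tuple[int, int]]]:
--     """
--     Get all type 1 subsets: n blue elements with different first member.
--     """
--     # Group by first coordinate
--     by_first = {}
--     for h, k in blue_points:
--         if h not in by_first:
--             by_first[h] = []
--         by_first[h].append((h, k))
--
--     # We need exactly n different first coordinates
--     if len(by_first) < n:
--         return []
--
--     # Choose n different first coordinates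
--     type1_subsets = []
--     for first_coords in itertools.combinations(sorted(by_first.keys()), n):
--         # For each chosen first coordinate, choose one point
--         point_choices = [by_first[h] for h in first_coords]
--         for combo in itertools.product(*point_choices):
--             type1_subsets.append(set(combo))
--
--     return type1_subsets
-- ===== SOURCE B (Python) =====
-- def get_type1_subsets(blue_points, n):
--     """
--     Get all type 1 subsets: n blue elements with different first member.
--
--     Same grouping/guard as before, but the subsets are enumerated by one fused
--     recursion over the sorted groups (pick-or-skip each group) instead of
--     itertools.combinations followed by itertools.product.
--     """
--     by_first = {}
--     for h, k in blue_points: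
--         by_first.setdefault(h, []).append((h, k))
--
--     if len(by_first) < n:
--         return []
--
--     groups = [by_first[h] for h in sorted(by_first)]
--
--     def rec(gs, r):
--         # one block (list of chosen tuples) per combination of r groups from gs
--         if r == 0:
--             return [[[]]]
--         if not gs:
--             return []
--         rest = gs[1:]
--         picked = [[[p] + t for p in gs[0] for t in block] for block in rec(rest, r - 1)]
--         return picked + rec(rest, r)
--
--     return [set(c) for block in rec(groups, n) for c in block]
-- ===== Notes on version B (the rewrite author's own statement) =====
-- stated objective: alternative
-- what changed: Replaces the itertools.combinations-of-keys followed by itertools.product enumeration with one fused pick-or-skip recursion over the sorted groups that builds each combination's product block directly, emitting subsets in the same order.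
import Mathlib
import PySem

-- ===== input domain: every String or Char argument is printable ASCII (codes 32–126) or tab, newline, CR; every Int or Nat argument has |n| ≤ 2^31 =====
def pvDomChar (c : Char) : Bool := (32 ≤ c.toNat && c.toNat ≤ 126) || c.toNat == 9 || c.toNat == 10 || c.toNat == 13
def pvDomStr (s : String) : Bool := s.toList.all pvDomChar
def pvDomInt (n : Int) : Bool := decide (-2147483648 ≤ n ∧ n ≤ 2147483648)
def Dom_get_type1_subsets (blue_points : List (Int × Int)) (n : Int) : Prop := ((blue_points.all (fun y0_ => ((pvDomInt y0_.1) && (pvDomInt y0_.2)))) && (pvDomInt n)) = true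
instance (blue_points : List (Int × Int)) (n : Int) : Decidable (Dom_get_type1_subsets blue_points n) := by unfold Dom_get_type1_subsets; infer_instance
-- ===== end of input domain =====

-- ===== PORT A =====
-- itertools.combinations(xs, r), hand-ported (same generation order)
def pvCombosA : List Int → Nat → List (List Int)
  | _, 0 => [[]]
  | [], _+1 => []
  | x :: xs, r+1 => ((pvCombosA xs r).map (fun c => x :: c)) ++ pvCombosA xs (r+1)

-- itertools.product(*lists), hand-ported (first list varies slowest)
def pvProductA : List (List (Int × Int)) → List (List (Int × Int))
  | [] => [[]]
  | l :: ls => l.flatMap (fun p => (pvProductA ls).map (fun t => p :: t))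

def get_type1_subsets (blue_points : List (Int × Int)) (n : Int) : List (List (Int × Int)) :=
  let by_first := blue_points.foldl
    (fun d p =>
      (if d.contains p.1 then d else d.insert p.1 ([] : List (Int × Int))).modify
        p.1 [] (fun l => l ++ [p]))
    PySem.Dict.empty
  if (by_first.size : Int) < n then []
  else
    (pvCombosA (PySem.List.sorted by_first.keys (fun x => x) false) n.toNat).foldl
      (fun acc fc =>
        (pvProductA (fc.map (fun h => by_first.getD h []))).foldl
          (fun acc2 c => acc2 ++ [PySem.Set.ofList c]) acc)
      []

-- ===== PORT B =====
-- rec(gs, r): one block (product list) per combination of r groups from gs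
def pvRecB (gs : List (List (Int × Int))) (r : Int) : List (List (List (Int × Int))) :=
  if r = 0 then [[[]]]
  else
    match gs with
    | [] => []
    | g :: rest =>
        ((pvRecB rest (r - 1)).map (fun block => g.flatMap (fun p => block.map (fun t => p :: t))))
          ++ pvRecB rest r

def get_type1_subsets_alt (blue_points : List (Int × Int)) (n : Int) : List (List (Int × Int)) :=
  let by_first := blue_points.foldl
    (fun d p => (d.setdefault p.1 ([] : List (Int × Int))).modify p.1 [] (fun l => l ++ [p]))
    PySem.Dict.empty
  if (by_first.size : Int) < n then []
  else
    let groups := (PySem.List.sorted by_first.keys (fun x => x) false).map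
      (fun h => by_first.getD h [])
    (pvRecB groups n).flatMap (fun block => block.map (fun c => PySem.Set.ofList c))

-- ===== PRECONDITION & SPEC =====
-- A raises ValueError iff n < 0 (itertools.combinations rejects a negative r); otherwise total.
def Pre_get_type1_subsets (blue_points : List (Int × Int)) (n : Int) : Prop := 0 ≤ n
instance (blue_points : List (Int × Int)) (n : Int) : Decidable (Pre_get_type1_subsets blue_points n) := by unfold Pre_get_type1_subsets; infer_instance
def pvWitness_get_type1_subsets : (List (Int × Int)) × Int := ([(0, 1), (0, 2), (1, 5)], 2)

def Spec_get_type1_subsets (blue_points : List (Int × Int)) (n : Int) (out : List (List (Int × Int))) : Prop := out = get_type1_subsets_alt blue_points n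
instance (blue_points : List (Int × Int)) (n : Int) (out : List (List (Int × Int))) : Decidable (Spec_get_type1_subsets blue_points n out) := by unfold Spec_get_type1_subsets; infer_instance

-- ===== CLAIM (what is proved, stated in full; the proofs are below) =====
def Claim_equal_get_type1_subsets : Prop := ∀ (blue_points : List (Int × Int)) (n : Int), Dom_get_type1_subsets blue_points n → Pre_get_type1_subsets blue_points n → Spec_get_type1_subsets blue_points n (get_type1_subsets blue_points n)

-- ===== LEMMAS AND PROOFS =====

-- the two grouping loops use the same step function
lemma pvStep_eq :
    (fun (d : PySem.Dict Int (List (Int × Int))) (p : Int × Int) =>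
      (if d.contains p.1 then d else d.insert p.1 ([] : List (Int × Int))).modify
        p.1 [] (fun l => l ++ [p]))
  = (fun (d : PySem.Dict Int (List (Int × Int))) (p : Int × Int) =>
      (d.setdefault p.1 ([] : List (Int × Int))).modify p.1 [] (fun l => l ++ [p])) := by
  funext d p
  by_cases h : d.contains p.1
  · rw [PySem.Dict.setdefault_of_contains d ([] : List (Int × Int)) h, if_pos h]
  · rw [PySem.Dict.setdefault_of_not_contains d ([] : List (Int × Int)) (by simpa using h),
      if_neg h]

lemma pvRecB_zero (gs : List (List (Int × Int))) : pvRecB gs (0 : Int) = [[[]]] := by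
  rw [pvRecB.eq_def]; simp

lemma pvRecB_nil (r : Int) (h : r ≠ 0) : pvRecB [] r = [] := by
  rw [pvRecB.eq_def]; simp [h]

-- pvRecB steps on nonzero fuel
lemma pvRecB_cons (g : List (Int × Int)) (gs : List (List (Int × Int))) (r : Int) (h : r ≠ 0) :
    pvRecB (g :: gs) r
      = ((pvRecB gs (r - 1)).map
          (fun block => g.flatMap (fun p => block.map (fun t => p :: t))))
        ++ pvRecB gs r := by
  rw [pvRecB.eq_def]; simp [h]

-- the core correspondence: one rec block per combination, holding its product list
lemma pvMain (look : Int → List (Int × Int)) :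
    ∀ (ks : List Int) (r : Nat),
    (pvCombosA ks r).map (fun fc => pvProductA (fc.map look))
      = pvRecB (ks.map look) ((r : Nat) : Int) := by
  intro ks
  induction ks with
  | nil =>
    intro r
    cases r with
    | zero => simp [pvCombosA, pvProductA, pvRecB_zero]
    | succ r =>
      simp only [List.map_nil]
      rw [pvRecB_nil _ (by omega)]
      simp [pvCombosA]
  | cons k ks ih =>
    intro r
    cases r with
    | zero => simp [pvCombosA, pvProductA, pvRecB_zero]
    | succ r =>
      rw [List.map_cons, pvRecB_cons _ _ _ (by omega)]
      have h2 : (((r + 1 : Nat) : Int)) - 1 = ((r : Nat) : Int) := by omega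
      rw [h2, ← ih r, ← ih (r + 1)]
      show ((pvCombosA ks r).map (fun c => k :: c) ++ pvCombosA ks (r + 1)).map
          (fun fc => pvProductA (fc.map look)) = _
      rw [List.map_append, List.map_map, List.map_map]
      congr 1

-- A's appending double foldl is the flatMap of the per-combination product blocks
lemma pvFold (look : Int → List (Int × Int)) (cs : List (List Int)) :
    ∀ (acc : List (List (Int × Int))),
    cs.foldl
      (fun acc fc =>
        (pvProductA (fc.map look)).foldl (fun acc2 c => acc2 ++ [PySem.Set.ofList c]) acc) acc
    = acc ++ (cs.map (fun fc => pvProductA (fc.map look))).flatMap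
        (fun block => block.map (fun c => PySem.Set.ofList c)) := by
  induction cs with
  | nil => intro acc; simp
  | cons fc cs ih =>
    intro acc
    rw [List.foldl_cons, ih, PySem.List.foldl_append_singleton_eq_map]
    simp [List.append_assoc]

theorem get_type1_subsets_spec : Claim_equal_get_type1_subsets := by
  intro blue_points n _ hpre
  unfold Spec_get_type1_subsets get_type1_subsets get_type1_subsets_alt
  rw [← pvStep_eq]
  set d := blue_points.foldl
    (fun d p =>
      (if d.contains p.1 then d else d.insert p.1 ([] : List (Int × Int))).modify
        p.1 [] (fun l => l ++ [p]))
    PySem.Dict.empty with hd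
  by_cases hg : (d.size : Int) < n
  · simp [hg]
  · simp only [if_neg hg]
    have hn : n = ((n.toNat : Nat) : Int) := by
      unfold Pre_get_type1_subsets at hpre; omega
    rw [pvFold (fun h => d.getD h []),
      pvMain (fun h => d.getD h []) (PySem.List.sorted d.keys (fun x => x) false) n.toNat, ← hn]
    simp

-- ===== VERDICT (by name: the statement is the Claim_ definition above) =====
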